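-- pv_equiv track=rewrite | github.com/joao-conde/competitive-programming | others/suitable-locations.py | suitableLocations
-- ===== SOURCE A (Python) =====
-- def suitableLocations(center, d):
--     center.sort()
--
--     # left and right bounds given by our centers expanded
--     # by distance / 2 since we have to pick up and come back
--     min_x = center[0] - d // 2
--     max_x = center[-1] + d // 2
--     nxs = len(center)
--
--     locations = 0
--
--     for x in range(center[nxs // 2] + 1, max_x + 1):
--         total = 0
--         for c in center:
--             total += abs(x - c) * 2
--             if total > d:
--                 break
--         if total > d:
--             break
--         locations += 1
--
--     for x in range(center[nxs // 2], min_x - 1, -1):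
--         total = 0
--         for c in center:
--             total += abs(x - c) * 2
--             if total > d:
--                 break
--         if total > d:
--             break
--         locations += 1
--
--     return locations
-- ===== SOURCE B (Python) =====
-- def suitableLocations(center, d):
--     center.sort()
--     n = len(center)
--     m = center[n // 2]
--
--     def cost(x):
--         return sum(abs(x - c) for c in center) * 2
--
--     if cost(m) > d:
--         return 0
--
--     # largest x in [m, max_x] with cost(x) <= d (cost is nondecreasing right of the median)
--     lo, hi = m, center[-1] + d // 2
--     while lo < hi:
--         mid = (lo + hi + 1) // 2
--         if cost(mid) <= d:
--             lo = mid
--         else: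
--             hi = mid - 1
--     right = lo
--
--     # smallest x in [min_x, m] with cost(x) <= d (cost is nonincreasing left of the median)
--     lo, hi = center[0] - d // 2, m
--     while lo < hi:
--         mid = (lo + hi) // 2
--         if cost(mid) <= d:
--             hi = mid
--         else:
--             lo = mid + 1
--     left = hi
--
--     return right - left + 1
-- ===== Notes on version B (the rewrite author's own statement) =====
-- stated objective: alternative
-- what changed: A counts feasible integer locations by scanning outward from the median one point at a time with an early break; B exploits convexity of the round-trip cost and finds the two endpoints of the feasible interval by binary search, returning right - left + 1.
import Mathlib
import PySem

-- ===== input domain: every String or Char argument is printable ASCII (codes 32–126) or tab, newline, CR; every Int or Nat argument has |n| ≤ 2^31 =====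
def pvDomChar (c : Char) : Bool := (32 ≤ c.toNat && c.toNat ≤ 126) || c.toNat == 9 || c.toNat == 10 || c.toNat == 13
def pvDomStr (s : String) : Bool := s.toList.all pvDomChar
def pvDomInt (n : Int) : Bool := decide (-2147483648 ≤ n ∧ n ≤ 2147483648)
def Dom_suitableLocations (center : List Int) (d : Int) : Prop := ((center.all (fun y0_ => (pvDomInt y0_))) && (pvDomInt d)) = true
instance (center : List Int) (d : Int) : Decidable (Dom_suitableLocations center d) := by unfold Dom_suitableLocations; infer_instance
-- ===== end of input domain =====

-- B replaces A's point-by-point outward scans from the median by two binary searches for the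
-- endpoints of the (convex) feasible interval (objective: alternative algorithm). Both A and B sort
-- the input list in place in Python (same side effect); the equivalence proved here is about the return value.

-- ===== PORT A =====
-- inner 'for c in center' loop: running total with the 'if total > d: break'
def pvInner (d x : Int) : List Int → Int → Int
  | [], total => total
  | c :: rest, total =>
    if total + |x - c| * 2 > d then total + |x - c| * 2
    else pvInner d x rest (total + |x - c| * 2)

-- outer 'for x in range(...)' loops with their break; Python's range is lazy, so the loop is ported
-- as a recursion on the remaining number of range elements (fuel) that stops at the break
def pvScanUp (cs : List Int) (d : Int) : Nat → Int → Int → Int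
  | 0, _, locations => locations
  | fuel + 1, x, locations =>
    if pvInner d x cs 0 > d then locations
    else pvScanUp cs d fuel (x + 1) (locations + 1)

def pvScanDown (cs : List Int) (d : Int) : Nat → Int → Int → Int
  | 0, _, locations => locations
  | fuel + 1, x, locations =>
    if pvInner d x cs 0 > d then locations
    else pvScanDown cs d fuel (x - 1) (locations + 1)

def suitableLocations (center : List Int) (d : Int) : Int :=
  let cs := PySem.List.sorted center (fun v => v)
  match PySem.List.pyGet? cs 0, PySem.List.pyGet? cs (-1),
        PySem.List.pyGet? cs (PySem.Int.floordiv (cs.length : Int) 2) with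
  | some c0, some clast, some cm =>
    let min_x := c0 - PySem.Int.floordiv d 2
    let max_x := clast + PySem.Int.floordiv d 2
    let locations := pvScanUp cs d (max_x + 1 - (cm + 1)).toNat (cm + 1) 0
    pvScanDown cs d (cm - (min_x - 1)).toNat cm locations
  | _, _, _ => 0  -- center == []: Python raises IndexError (excluded by Pre_)

-- ===== PORT B =====
-- cost(x) = sum(abs(x - c) for c in center) * 2
def pvCost (cs : List Int) (x : Int) : Int :=
  (cs.map (fun c => |x - c|)).sum * 2

-- while lo < hi loops, ported with fuel = hi - lo (each step shrinks the interval by at least 1)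
-- binary search: largest x in [lo, hi] with cost(x) <= d (cost nondecreasing right of the median)
def pvBsUp (cs : List Int) (d : Int) : Nat → Int → Int → Int
  | 0, lo, _ => lo
  | fuel + 1, lo, hi =>
    if lo < hi then
      if pvCost cs (PySem.Int.floordiv (lo + hi + 1) 2) ≤ d then
        pvBsUp cs d fuel (PySem.Int.floordiv (lo + hi + 1) 2) hi
      else
        pvBsUp cs d fuel lo (PySem.Int.floordiv (lo + hi + 1) 2 - 1)
    else lo

-- binary search: smallest x in [lo, hi] with cost(x) <= d (cost nonincreasing left of the median)
def pvBsDown (cs : List Int) (d : Int) : Nat → Int → Int → Int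
  | 0, _, hi => hi
  | fuel + 1, lo, hi =>
    if lo < hi then
      if pvCost cs (PySem.Int.floordiv (lo + hi) 2) ≤ d then
        pvBsDown cs d fuel lo (PySem.Int.floordiv (lo + hi) 2)
      else
        pvBsDown cs d fuel (PySem.Int.floordiv (lo + hi) 2 + 1) hi
    else hi

def suitableLocations_alt (center : List Int) (d : Int) : Int :=
  let cs := PySem.List.sorted center (fun v => v)
  match PySem.List.pyGet? cs (PySem.Int.floordiv (cs.length : Int) 2) with
  | none => 0  -- center == []: IndexError in Python (excluded by Pre_)
  | some m =>
    match PySem.List.pyGet? cs 0 with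
    | none => 0
    | some c0 =>
      match PySem.List.pyGet? cs (-1) with
      | none => 0
      | some clast =>
        if pvCost cs m > d then 0
        else
          pvBsUp cs d (clast + PySem.Int.floordiv d 2 - m).toNat m (clast + PySem.Int.floordiv d 2)
            - pvBsDown cs d (m - (c0 - PySem.Int.floordiv d 2)).toNat (c0 - PySem.Int.floordiv d 2) m + 1

-- ===== PRECONDITION & SPEC =====
-- Pre_ excludes only the empty list, on which the Python A raises IndexError (center[0]).
def Pre_suitableLocations (center : List Int) (d : Int) : Prop := center ≠ []
instance (center : List Int) (d : Int) : Decidable (Pre_suitableLocations center d) := by unfold Pre_suitableLocations; infer_instance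
def pvWitness_suitableLocations : List Int × Int := ([0, 3, 5], 8)

def Spec_suitableLocations (center : List Int) (d : Int) (out : Int) : Prop := out = suitableLocations_alt center d
instance (center : List Int) (d : Int) (out : Int) : Decidable (Spec_suitableLocations center d out) := by unfold Spec_suitableLocations; infer_instance

-- ===== CLAIM (what is proved, stated in full; the proofs are below) =====
def Claim_equal_suitableLocations : Prop := ∀ (center : List Int) (d : Int), Dom_suitableLocations center d → Pre_suitableLocations center d → Spec_suitableLocations center d (suitableLocations center d)

-- ===== LEMMAS AND PROOFS =====

-- proof-side helper: the scanning loop as a fold over the explicit list of range elements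
def pvScan (cs : List Int) (d : Int) : List Int → Int → Int
  | [], locations => locations
  | x :: rest, locations =>
    if pvInner d x cs 0 > d then locations
    else pvScan cs d rest (locations + 1)

theorem pvScanUp_eq (cs : List Int) (d : Int) : ∀ (n : Nat) (a acc : Int),
    pvScanUp cs d n a acc = pvScan cs d (PySem.List.pyRange a (a + (n : Int)) 1) acc := by
  intro n
  induction n with
  | zero =>
    intro a acc
    rw [PySem.List.pyRange_one_eq_nil (by omega)]
    rfl
  | succ p ih =>
    intro a acc
    rw [PySem.List.pyRange_one_cons (by omega)]
    show (if pvInner d a cs 0 > d then acc else pvScanUp cs d p (a + 1) (acc + 1)) = _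
    rw [pvScan]
    split
    · rfl
    · rw [ih (a + 1) (acc + 1)]
      congr 2
      omega

theorem pvScanDown_eq (cs : List Int) (d : Int) : ∀ (n : Nat) (a acc : Int),
    pvScanDown cs d n a acc = pvScan cs d (PySem.List.pyRange a (a - (n : Int)) (-1)) acc := by
  intro n
  induction n with
  | zero =>
    intro a acc
    rw [PySem.List.pyRange_neg_one_eq_nil (by omega)]
    rfl
  | succ p ih =>
    intro a acc
    rw [PySem.List.pyRange_neg_one_cons (by omega)]
    show (if pvInner d a cs 0 > d then acc else pvScanDown cs d p (a - 1) (acc + 1)) = _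
    rw [pvScan]
    split
    · rfl
    · rw [ih (a - 1) (acc + 1)]
      congr 2
      omega

theorem pv_pyRange_clamp_up (a b : Int) :
    PySem.List.pyRange a (a + ((b - a).toNat : Int)) 1 = PySem.List.pyRange a b 1 := by
  rcases (by omega : a ≤ b ∨ b < a) with h | h
  · rw [show a + ((b - a).toNat : Int) = b by omega]
  · rw [PySem.List.pyRange_one_eq_nil (by omega), PySem.List.pyRange_one_eq_nil (by omega)]

theorem pv_pyRange_clamp_down (a b : Int) :
    PySem.List.pyRange a (a - ((a - b).toNat : Int)) (-1) = PySem.List.pyRange a b (-1) := by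
  rcases (by omega : b ≤ a ∨ a < b) with h | h
  · rw [show a - ((a - b).toNat : Int) = b by omega]
  · rw [PySem.List.pyRange_neg_one_eq_nil (by omega), PySem.List.pyRange_neg_one_eq_nil (by omega)]

-- |·| arithmetic
theorem pv_abs_add_one {x c : Int} (h : c ≤ x) : |x + 1 - c| = |x - c| + 1 := by
  rw [abs_of_nonneg (by omega), abs_of_nonneg (by omega)]; omega

theorem pv_abs_sub_one {x c : Int} (h : x ≤ c) : |x - 1 - c| = |x - c| + 1 := by
  rw [abs_of_nonpos (by omega), abs_of_nonpos (by omega)]; omega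

theorem pv_abs_near_up (x c : Int) : |x - c| - 1 ≤ |x + 1 - c| := by
  have h := abs_sub_abs_le_abs_sub (x - c) (x + 1 - c)
  have : |x - c - (x + 1 - c)| = 1 := by norm_num
  omega

theorem pv_abs_near_down (x c : Int) : |x - c| - 1 ≤ |x - 1 - c| := by
  have h := abs_sub_abs_le_abs_sub (x - c) (x - 1 - c)
  have : |x - c - (x - 1 - c)| = 1 := by norm_num
  omega

-- the inner loop (with its break) exceeds d exactly when the full cost does
theorem pvInner_gt (d x : Int) : ∀ (l : List Int) (t : Int),
    d < pvInner d x l t ↔ d < t + (l.map (fun c => |x - c|)).sum * 2 := by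
  intro l
  induction l with
  | nil => intro t; simp [pvInner]
  | cons c rest ih =>
    intro t
    have hnn : 0 ≤ (rest.map (fun c' => |x - c'|)).sum := by
      apply List.sum_nonneg; intro y hy
      obtain ⟨z, _, rfl⟩ := List.mem_map.mp hy
      exact abs_nonneg _
    simp only [pvInner, List.map_cons, List.sum_cons]
    split
    · constructor
      · intro _; nlinarith
      · intro _; omega
    · rw [ih]
      constructor <;> intro h <;> nlinarith

theorem pvInner_cost (cs : List Int) (d x : Int) :
    (d < pvInner d x cs 0) ↔ d < pvCost cs x := by
  rw [pvInner_gt, pvCost]; constructor <;> intro h <;> linarith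

-- the scanning loop counts the qualifying prefix
theorem pvScan_count (cs : List Int) (d : Int) : ∀ (L1 L2 : List Int) (acc : Int),
    (∀ y ∈ L1, pvCost cs y ≤ d) → (∀ y ∈ L2, d < pvCost cs y) →
    pvScan cs d (L1 ++ L2) acc = acc + L1.length := by
  intro L1
  induction L1 with
  | nil =>
    intro L2 acc _ h2
    cases L2 with
    | nil => simp [pvScan]
    | cons y l2 =>
      have : d < pvInner d y cs 0 := (pvInner_cost cs d y).mpr (h2 y (by simp))
      simp [pvScan, if_pos this]
  | cons y l1 ih =>
    intro L2 acc h1 h2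
    have hy : ¬ d < pvInner d y cs 0 := by
      rw [pvInner_cost]; exact not_lt.mpr (h1 y (by simp))
    simp only [List.cons_append, pvScan, if_neg hy]
    rw [ih L2 (acc + 1) (fun z hz => h1 z (by simp [hz])) h2]
    simp only [List.length_cons]; push_cast; ring

theorem pvScan_none (cs : List Int) (d : Int) (L : List Int) (acc : Int)
    (h : ∀ y ∈ L, d < pvCost cs y) : pvScan cs d L acc = acc := by
  have := pvScan_count cs d [] L acc (by simp) h
  simpa using this

-- sorted-list order facts
theorem pv_sorted_le {s : List Int} (hs : s.Pairwise (· ≤ ·)) {i j : Nat}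
    (hij : i ≤ j) (hj : j < s.length) : s[i]'(by omega) ≤ s[j] := by
  rcases Nat.eq_or_lt_of_le hij with h | h
  · subst h; exact le_refl _
  · exact List.pairwise_iff_getElem.mp hs i j (by omega) hj h

-- one step of monotonicity to the right of the median
theorem pvCost_step_up (s : List Int) (hs : s.Pairwise (· ≤ ·)) (hlen : 0 < s.length)
    (x : Int) (hx : s[s.length / 2]'(by omega) ≤ x) :
    pvCost s x ≤ pvCost s (x + 1) := by
  set n := s.length with hn
  set k := n / 2 with hkdef
  have hk : k < n := by omega
  set f : Int → Int := fun c => |x - c| with hf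
  set g : Int → Int := fun c => |x + 1 - c| with hg
  have hTlen : (s.take (k + 1)).length = k + 1 := by
    rw [List.length_take]; omega
  have hDlen : (s.drop (k + 1)).length = n - (k + 1) := by
    rw [List.length_drop]
  have hT : ∀ c ∈ s.take (k + 1), c ≤ x := by
    intro c hc
    obtain ⟨i, hi, rfl⟩ := List.mem_iff_getElem.mp hc
    rw [List.getElem_take]
    exact le_trans (pv_sorted_le hs (by omega) hk) hx
  have e1 : ((s.take (k + 1)).map g).sum = ((s.take (k + 1)).map f).sum + (k + 1) := by
    have : (s.take (k + 1)).map g = (s.take (k + 1)).map (fun c => f c + 1) := by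
      apply List.map_congr_left
      intro c hc
      exact pv_abs_add_one (hT c hc)
    rw [this, PySem.List.sum_map_add_int, PySem.List.sum_map_const_int, hTlen]
    push_cast; ring
  have e2 : ((s.drop (k + 1)).map f).sum - (n - (k + 1) : Int) ≤ ((s.drop (k + 1)).map g).sum := by
    have h1 : ((s.drop (k + 1)).map (fun c => f c + (-1))).sum ≤ ((s.drop (k + 1)).map g).sum := by
      apply List.sum_le_sum
      intro c _
      have := pv_abs_near_up x c
      simp only [hf, hg]; omega
    rw [PySem.List.sum_map_add_int, PySem.List.sum_map_const_int, hDlen] at h1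
    have hkn : ((n - (k + 1) : Nat) : Int) = (n : Int) - (k + 1) := by omega
    rw [hkn] at h1
    linarith
  have hfx : pvCost s x = (((s.take (k + 1)).map f).sum + ((s.drop (k + 1)).map f).sum) * 2 := by
    rw [pvCost, ← List.sum_append, ← List.map_append, List.take_append_drop]
  have hgx : pvCost s (x + 1) = (((s.take (k + 1)).map g).sum + ((s.drop (k + 1)).map g).sum) * 2 := by
    rw [pvCost, ← List.sum_append, ← List.map_append, List.take_append_drop]
  have hcount : (2 : Int) * (k + 1) - (n : Int) ≥ 0 := by omega
  rw [hfx, hgx, e1]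
  linarith

-- one step of monotonicity to the left of the median
theorem pvCost_step_down (s : List Int) (hs : s.Pairwise (· ≤ ·)) (hlen : 0 < s.length)
    (x : Int) (hx : x ≤ s[s.length / 2]'(by omega)) :
    pvCost s x ≤ pvCost s (x - 1) := by
  set n := s.length with hn
  set k := n / 2 with hkdef
  have hk : k < n := by omega
  set f : Int → Int := fun c => |x - c| with hf
  set g : Int → Int := fun c => |x - 1 - c| with hg
  have hTlen : (s.take k).length = k := by rw [List.length_take]; omega
  have hDlen : (s.drop k).length = n - k := by rw [List.length_drop]
  have hD : ∀ c ∈ s.drop k, x ≤ c := by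
    intro c hc
    obtain ⟨i, hi, rfl⟩ := List.mem_iff_getElem.mp hc
    rw [List.getElem_drop]
    have hki : k + i < n := by rw [hDlen] at hi; omega
    exact le_trans hx (pv_sorted_le hs (by omega) hki)
  have e1 : ((s.drop k).map g).sum = ((s.drop k).map f).sum + (n - k : Int) := by
    have : (s.drop k).map g = (s.drop k).map (fun c => f c + 1) := by
      apply List.map_congr_left
      intro c hc
      exact pv_abs_sub_one (hD c hc)
    rw [this, PySem.List.sum_map_add_int, PySem.List.sum_map_const_int, hDlen]
    omega
  have e2 : ((s.take k).map f).sum - (k : Int) ≤ ((s.take k).map g).sum := by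
    have h1 : ((s.take k).map (fun c => f c + (-1))).sum ≤ ((s.take k).map g).sum := by
      apply List.sum_le_sum
      intro c _
      have := pv_abs_near_down x c
      simp only [hf, hg]; omega
    rw [PySem.List.sum_map_add_int, PySem.List.sum_map_const_int, hTlen] at h1
    linarith
  have hfx : pvCost s x = (((s.take k).map f).sum + ((s.drop k).map f).sum) * 2 := by
    rw [pvCost, ← List.sum_append, ← List.map_append, List.take_append_drop]
  have hgx : pvCost s (x - 1) = (((s.take k).map g).sum + ((s.drop k).map g).sum) * 2 := by
    rw [pvCost, ← List.sum_append, ← List.map_append, List.take_append_drop]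
  have hcount : (n : Int) - k - k ≥ 0 := by omega
  rw [hfx, hgx, e1]
  linarith

theorem pvCost_mono_up (s : List Int) (hs : s.Pairwise (· ≤ ·)) (hlen : 0 < s.length)
    (a b : Int) (ha : s[s.length / 2]'(by omega) ≤ a) (hab : a ≤ b) :
    pvCost s a ≤ pvCost s b := by
  have key : ∀ (m : Nat) (b : Int), (b - a).toNat = m → a ≤ b → pvCost s a ≤ pvCost s b := by
    intro m
    induction m with
    | zero => intro b hm hab2; have : b = a := by omega
              subst this; exact le_refl _
    | succ p ih =>
      intro b hm hab2
      have hb1 : a ≤ b - 1 := by omega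
      have := ih (b - 1) (by omega) hb1
      have hstep := pvCost_step_up s hs hlen (b - 1) (by omega)
      have he : b - 1 + 1 = b := by ring
      rw [he] at hstep
      linarith
  exact key (b - a).toNat b rfl hab

theorem pvCost_mono_down (s : List Int) (hs : s.Pairwise (· ≤ ·)) (hlen : 0 < s.length)
    (a b : Int) (hab : b ≤ a) (ha : a ≤ s[s.length / 2]'(by omega)) :
    pvCost s a ≤ pvCost s b := by
  have key : ∀ (m : Nat) (b : Int), (a - b).toNat = m → b ≤ a → pvCost s a ≤ pvCost s b := by
    intro m
    induction m with
    | zero => intro b hm hab2; have : b = a := by omega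
              subst this; exact le_refl _
    | succ p ih =>
      intro b hm hab2
      have hb1 : b + 1 ≤ a := by omega
      have := ih (b + 1) (by omega) hb1
      have hstep := pvCost_step_down s hs hlen (b + 1) (by omega)
      have he : b + 1 - 1 = b := by ring
      rw [he] at hstep
      linarith
  exact key (a - b).toNat b rfl hab

-- any feasible x lies within floordiv d 2 of every centre
theorem pvCost_bound (s : List Int) (c : Int) (hc : c ∈ s) (x d : Int)
    (h : pvCost s x ≤ d) :
    c - PySem.Int.floordiv d 2 ≤ x ∧ x ≤ c + PySem.Int.floordiv d 2 := by
  have h1 : |x - c| ≤ (s.map (fun c' => |x - c'|)).sum := by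
    apply List.single_le_sum
    · intro y hy
      obtain ⟨z, _, rfl⟩ := List.mem_map.mp hy
      exact abs_nonneg _
    · exact List.mem_map_of_mem hc
  have h2 := PySem.Int.floordiv_mul_add_mod d 2
  have h3 := PySem.Int.mod_two_eq d
  have habs : |x - c| ≤ PySem.Int.floordiv d 2 := by
    rw [pvCost] at h; omega
  obtain ⟨hl, hr⟩ := abs_le.mp habs
  omega

-- binary-search invariants (fuel-indexed; enough fuel means the loop terminates with lo = hi)
theorem pvBsUp_spec (s : List Int) (d med : Int)
    (mono : ∀ a b : Int, med ≤ a → a ≤ b → pvCost s a ≤ pvCost s b) :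
    ∀ (fuel : Nat) (lo hi : Int), (hi - lo).toNat ≤ fuel →
      med ≤ lo → lo ≤ hi → pvCost s lo ≤ d →
      (∀ x : Int, hi < x → d < pvCost s x) →
      med ≤ pvBsUp s d fuel lo hi ∧ pvCost s (pvBsUp s d fuel lo hi) ≤ d ∧
        ∀ x : Int, pvBsUp s d fuel lo hi < x → d < pvCost s x := by
  intro fuel
  induction fuel with
  | zero =>
    intro lo hi hf hlo hle hcost hinv
    have : hi = lo := by omega
    subst this
    exact ⟨hlo, hcost, hinv⟩
  | succ p ih =>
    intro lo hi hf hlo hle hcost hinv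
    by_cases hlt : lo < hi
    · have h1 := PySem.Int.floordiv_mul_add_mod (lo + hi + 1) 2
      have h2 := PySem.Int.mod_two_eq (lo + hi + 1)
      rw [pvBsUp, if_pos hlt]
      split
      · next hcm =>
        exact ih (PySem.Int.floordiv (lo + hi + 1) 2) hi (by omega) (by omega) (by omega) hcm hinv
      · next hcm =>
        apply ih lo (PySem.Int.floordiv (lo + hi + 1) 2 - 1) (by omega) hlo (by omega) hcost
        intro x hx
        by_cases hxh : hi < x
        · exact hinv x hxh
        · have := mono (PySem.Int.floordiv (lo + hi + 1) 2) x (by omega) (by omega)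
          omega
    · rw [pvBsUp, if_neg hlt]
      exact ⟨hlo, hcost, fun x hx => hinv x (by omega)⟩

theorem pvBsDown_spec (s : List Int) (d med : Int)
    (mono : ∀ a b : Int, b ≤ a → a ≤ med → pvCost s a ≤ pvCost s b) :
    ∀ (fuel : Nat) (lo hi : Int), (hi - lo).toNat ≤ fuel →
      hi ≤ med → lo ≤ hi → pvCost s hi ≤ d →
      (∀ x : Int, x < lo → d < pvCost s x) →
      pvBsDown s d fuel lo hi ≤ med ∧ pvCost s (pvBsDown s d fuel lo hi) ≤ d ∧
        ∀ x : Int, x < pvBsDown s d fuel lo hi → d < pvCost s x := by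
  intro fuel
  induction fuel with
  | zero =>
    intro lo hi hf hhi hle hcost hinv
    have : hi = lo := by omega
    exact ⟨hhi, hcost, by rw [pvBsDown, this]; exact hinv⟩
  | succ p ih =>
    intro lo hi hf hhi hle hcost hinv
    by_cases hlt : lo < hi
    · have h1 := PySem.Int.floordiv_mul_add_mod (lo + hi) 2
      have h2 := PySem.Int.mod_two_eq (lo + hi)
      rw [pvBsDown, if_pos hlt]
      split
      · next hcm =>
        exact ih lo (PySem.Int.floordiv (lo + hi) 2) (by omega) (by omega) (by omega) hcm hinv
      · next hcm =>
        apply ih (PySem.Int.floordiv (lo + hi) 2 + 1) hi (by omega) hhi (by omega) hcost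
        intro x hx
        by_cases hxl : x < lo
        · exact hinv x hxl
        · have := mono (PySem.Int.floordiv (lo + hi) 2) x (by omega) (by omega)
          omega
    · have : lo = hi := by omega
      subst this
      rw [pvBsDown, if_neg hlt]
      exact ⟨hhi, hcost, hinv⟩

-- split a countdown range at any point
theorem pv_pyRange_neg_append (a c b : Int) (h1 : b + 1 ≤ c) (h2 : c ≤ a + 1) :
    PySem.List.pyRange a b (-1) =
      PySem.List.pyRange a (c - 1) (-1) ++ PySem.List.pyRange (c - 1) b (-1) := by
  rw [PySem.List.pyRange_neg_one_eq_reverse a b,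
      PySem.List.pyRange_one_append (b + 1) c (a + 1) h1 h2,
      List.reverse_append,
      PySem.List.pyRange_neg_one_eq_reverse a (c - 1),
      PySem.List.pyRange_neg_one_eq_reverse (c - 1) b]
  have e : c - 1 + 1 = c := by ring
  rw [e]

-- the core equivalence, stated over an abstract median med with the convexity facts as hypotheses
theorem pv_core_gen (s : List Int) (d med c0 cl : Int)
    (hmono_up : ∀ a b : Int, med ≤ a → a ≤ b → pvCost s a ≤ pvCost s b)
    (hmono_dn : ∀ a b : Int, b ≤ a → a ≤ med → pvCost s a ≤ pvCost s b)
    (hbound : ∀ x : Int, pvCost s x ≤ d →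
      c0 - PySem.Int.floordiv d 2 ≤ x ∧ x ≤ cl + PySem.Int.floordiv d 2) :
    pvScan s d (PySem.List.pyRange med (c0 - PySem.Int.floordiv d 2 - 1) (-1))
        (pvScan s d (PySem.List.pyRange (med + 1) (cl + PySem.Int.floordiv d 2 + 1) 1) 0)
      = if d < pvCost s med then (0 : Int)
        else pvBsUp s d (cl + PySem.Int.floordiv d 2 - med).toNat med (cl + PySem.Int.floordiv d 2)
            - pvBsDown s d (med - (c0 - PySem.Int.floordiv d 2)).toNat
                (c0 - PySem.Int.floordiv d 2) med + 1 := by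
  set q := PySem.Int.floordiv d 2 with hq
  by_cases hcm : d < pvCost s med
  · rw [if_pos hcm]
    have hup : pvScan s d (PySem.List.pyRange (med + 1) (cl + q + 1) 1) 0 = 0 := by
      apply pvScan_none
      intro y hy
      obtain ⟨hy1, hy2⟩ := PySem.List.mem_pyRange_one.mp hy
      have := hmono_up med y le_rfl (by omega)
      omega
    rw [hup]
    apply pvScan_none
    intro y hy
    obtain ⟨hy1, hy2⟩ := PySem.List.mem_pyRange_neg_one.mp hy
    have := hmono_dn med y hy2 le_rfl
    omega
  · rw [if_neg hcm]
    push_neg at hcm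
    have hbm := hbound med hcm
    have hinvUp : ∀ x : Int, cl + q < x → d < pvCost s x := by
      intro x hx
      by_contra hle
      push_neg at hle
      have := (hbound x hle).2
      omega
    have hinvDn : ∀ x : Int, x < c0 - q → d < pvCost s x := by
      intro x hx
      by_contra hle
      push_neg at hle
      have := (hbound x hle).1
      omega
    obtain ⟨hR1, hR2, hR3⟩ :=
      pvBsUp_spec s d med hmono_up (cl + q - med).toNat med (cl + q)
        le_rfl le_rfl (by omega) hcm hinvUp
    set R := pvBsUp s d (cl + q - med).toNat med (cl + q) with hR
    have hRmx : R ≤ cl + q := (hbound R hR2).2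
    obtain ⟨hL1, hL2, hL3⟩ :=
      pvBsDown_spec s d med hmono_dn (med - (c0 - q)).toNat (c0 - q) med
        le_rfl le_rfl (by omega) hcm hinvDn
    set L := pvBsDown s d (med - (c0 - q)).toNat (c0 - q) med with hL
    have hLmn : c0 - q ≤ L := (hbound L hL2).1
    rw [PySem.List.pyRange_one_append (med + 1) (R + 1) (cl + q + 1) (by omega) (by omega)]
    rw [pvScan_count s d _ _ 0
      (by
        intro y hy
        obtain ⟨hy1, hy2⟩ := PySem.List.mem_pyRange_one.mp hy
        have := hmono_up y R (by omega) (by omega)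
        omega)
      (by
        intro y hy
        obtain ⟨hy1, hy2⟩ := PySem.List.mem_pyRange_one.mp hy
        exact hR3 y (by omega))]
    rw [pv_pyRange_neg_append med L (c0 - q - 1) (by omega) (by omega)]
    rw [pvScan_count s d _ _ _
      (by
        intro y hy
        obtain ⟨hy1, hy2⟩ := PySem.List.mem_pyRange_neg_one.mp hy
        have := hmono_dn y L (by omega) (by omega)
        omega)
      (by
        intro y hy
        obtain ⟨hy1, hy2⟩ := PySem.List.mem_pyRange_neg_one.mp hy
        exact hL3 y (by omega))]
    rw [PySem.List.length_pyRange_one, PySem.List.length_pyRange_neg_one]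
    omega

-- ===== VERDICT (by name: the statement is the Claim_ definition above) =====
theorem suitableLocations_spec : Claim_equal_suitableLocations := by
  intro center d _ hpre
  unfold Spec_suitableLocations suitableLocations suitableLocations_alt
  set s := PySem.List.sorted center (fun v => v) with hs'
  have hsne : s ≠ [] := by
    rw [hs', Ne, PySem.List.sorted_eq_nil_iff]
    exact hpre
  have hlen : 0 < s.length := List.length_pos_of_ne_nil hsne
  have hpair : s.Pairwise (· ≤ ·) := by
    rw [hs']
    simpa using PySem.List.sorted_pairwise center (fun v => v)
  have hfd : PySem.Int.floordiv (s.length : Int) 2 = ((s.length / 2 : Nat) : Int) := by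
    rw [PySem.Int.floordiv_eq_ediv_of_pos (by norm_num)]
    omega
  have h0 : PySem.List.pyGet? s 0 = some (s[0]'(by omega)) := by
    rw [PySem.List.pyGet?_zero]
    exact List.getElem?_eq_getElem (by omega)
  have hlast : PySem.List.pyGet? s (-1) = some (s[s.length - 1]'(by omega)) := by
    rw [PySem.List.pyGet?_neg_one, List.getLast?_eq_getElem?]
    exact List.getElem?_eq_getElem (by omega)
  have hmid : PySem.List.pyGet? s (PySem.Int.floordiv (s.length : Int) 2)
      = some (s[s.length / 2]'(by omega)) := by
    rw [hfd, PySem.List.pyGet?_natCast]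
    exact List.getElem?_eq_getElem (by omega)
  simp only [h0, hlast, hmid]
  rw [pvScanUp_eq, pvScanDown_eq, pv_pyRange_clamp_up, pv_pyRange_clamp_down]
  exact pv_core_gen s d (s[s.length / 2]'(by omega)) (s[0]'(by omega)) (s[s.length - 1]'(by omega))
    (fun a b ha hab => pvCost_mono_up s hpair hlen a b ha hab)
    (fun a b hab ha => pvCost_mono_down s hpair hlen a b hab ha)
    (fun x hx => ⟨(pvCost_bound s _ (List.getElem_mem _) x d hx).1,
                  (pvCost_bound s _ (List.getElem_mem _) x d hx).2⟩)
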